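-- pv_equiv track=rewrite | github.com/ComputationTime/CCCJuniorPrep | Calvin/ccc 11 j5.py | goodNumber
-- ===== SOURCE A (Python) =====
-- def goodNumber(N, x):
--     last = N
--     ok = True
--     while x > 0 and ok:
--         digit = x % 10
--         ok = digit < last
--         last = digit
--         x = x // 10
--     return ok
-- ===== SOURCE B (Python) =====
-- def goodNumber(N, x):
--     if x <= 0:
--         return True
--     s = str(x)
--     return int(s[-1]) < N and all(a < b for a, b in zip(s, s[1:]))
-- ===== Notes on version B (the rewrite author's own statement) =====
-- stated objective: idiomatic
-- what changed: Replaces the arithmetic %10///10 digit-peeling loop (least-significant first, with last/ok loop state) by a check on the decimal string: units digit compared to N and adjacent characters of str(x) compared pairwise left-to-right with zip.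
import Mathlib
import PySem

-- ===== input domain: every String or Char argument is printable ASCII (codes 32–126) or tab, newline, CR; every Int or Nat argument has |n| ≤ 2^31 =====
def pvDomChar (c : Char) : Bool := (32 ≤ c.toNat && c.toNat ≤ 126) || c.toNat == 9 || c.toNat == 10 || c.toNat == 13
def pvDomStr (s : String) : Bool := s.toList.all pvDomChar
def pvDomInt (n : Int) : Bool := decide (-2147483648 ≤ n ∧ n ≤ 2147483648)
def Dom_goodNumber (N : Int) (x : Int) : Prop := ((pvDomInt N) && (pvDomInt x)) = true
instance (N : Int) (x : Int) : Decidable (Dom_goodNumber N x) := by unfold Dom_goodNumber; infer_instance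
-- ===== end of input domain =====

-- B re-implements the %10-peeling loop as a pairwise check on the decimal string str(x); idiomatic, not faster.

-- ===== PORT A =====
-- the while loop of A, state (last, ok, x)
def goodNumberLoop (last : Int) (ok : Bool) (x : Int) : Bool :=
  if _h : x > 0 ∧ ok = true then
    let digit := PySem.Int.mod x 10
    goodNumberLoop digit (decide (digit < last)) (PySem.Int.floordiv x 10)
  else ok
termination_by x.toNat
decreasing_by
  rw [PySem.Int.floordiv_eq_ediv_of_pos (by omega : (0:Int) < 10)]
  omega

def goodNumber (N : Int) (x : Int) : Bool := goodNumberLoop N true x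

-- ===== PORT B =====
-- int(c) for a single decimal digit character; exact on '0'..'9'
def pvDigitVal (c : Char) : Int := (c.toNat : Int) - 48

def goodNumber_alt (N : Int) (x : Int) : Bool :=
  if x ≤ 0 then true
  else
    let s := PySem.Int.toChars x        -- s = str(x), on the List Char side (Int.toList_toStr)
    match PySem.List.pyGet? s (-1) with -- s[-1]
    | none => true                      -- unreachable: str of a positive int is nonempty
    | some c =>
      decide (pvDigitVal c < N) &&
        (s.zip (PySem.List.slice s (some 1) none)).all (fun p => decide (p.1 < p.2))  -- zip(s, s[1:])

-- ===== PRECONDITION & SPEC =====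
def Spec_goodNumber (N : Int) (x : Int) (out : Bool) : Prop := out = goodNumber_alt N x
instance (N : Int) (x : Int) (out : Bool) : Decidable (Spec_goodNumber N x out) := by unfold Spec_goodNumber; infer_instance

-- ===== CLAIM (what is proved, stated in full; the proofs are below) =====
def Claim_equal_goodNumber : Prop := ∀ (N : Int) (x : Int), Dom_goodNumber N x → Spec_goodNumber N x (goodNumber N x)

-- ===== LEMMAS AND PROOFS =====

-- adjacent-pairs check of B, on the tail form (slice s 1 none = s.tail)
def pvAdjAll (s : List Char) : Bool := (s.zip s.tail).all (fun p => decide (p.1 < p.2))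

-- toDigitsCore: accumulator shift
lemma toDigitsCore_acc (fuel n : Nat) (ds : List Char) :
    Nat.toDigitsCore 10 fuel n ds = Nat.toDigitsCore 10 fuel n [] ++ ds := by
  induction fuel generalizing n ds with
  | zero => simp [Nat.toDigitsCore]
  | succ f ih =>
    simp only [Nat.toDigitsCore]
    by_cases h : n / 10 = 0
    · simp [h]
    · simp only [h]
      rw [ih (n / 10) [(n % 10).digitChar], ih (n / 10) ((n % 10).digitChar :: ds)]
      simp

-- toDigitsCore: fuel irrelevance above n
lemma toDigitsCore_fuel (n : Nat) : ∀ f₁ f₂, n < f₁ → n < f₂ →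
    Nat.toDigitsCore 10 f₁ n [] = Nat.toDigitsCore 10 f₂ n [] := by
  induction n using Nat.strong_induction_on with
  | _ n ih =>
    intro f₁ f₂ h₁ h₂
    match f₁, f₂ with
    | g₁ + 1, g₂ + 1 =>
      simp only [Nat.toDigitsCore]
      by_cases h : n / 10 = 0
      · simp [h]
      · have hlt : n / 10 < n := Nat.div_lt_self (by omega) (by omega)
        simp only [h]
        rw [toDigitsCore_acc g₁, toDigitsCore_acc g₂,
            ih (n / 10) hlt g₁ g₂ (by omega) (by omega)]

lemma toDigits_small (n : Nat) (h : n < 10) : Nat.toDigits 10 n = [Nat.digitChar n] := by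
  simp [Nat.toDigits, Nat.toDigitsCore, Nat.div_eq_of_lt h, Nat.mod_eq_of_lt h]

lemma toDigits_step (n : Nat) (h : 10 ≤ n) :
    Nat.toDigits 10 n = Nat.toDigits 10 (n / 10) ++ [Nat.digitChar (n % 10)] := by
  have h0 : n / 10 ≠ 0 := by
    intro hc; have := Nat.div_add_mod n 10; have := Nat.mod_lt n (show 0 < 10 by omega); omega
  have hlt : n / 10 < n := Nat.div_lt_self (by omega) (by omega)
  show Nat.toDigitsCore 10 (n + 1) n [] = _
  simp only [Nat.toDigitsCore, h0]
  rw [toDigitsCore_acc, toDigitsCore_fuel (n / 10) n (n / 10 + 1) (by omega) (by omega)]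
  rfl

lemma toDigits_ne_nil (n : Nat) : Nat.toDigits 10 n ≠ [] := by
  by_cases h : n < 10
  · rw [toDigits_small n h]; simp
  · rw [toDigits_step n (by omega)]; simp

lemma toDigits_getLastD (n : Nat) (d : Char) :
    (Nat.toDigits 10 n).getLastD d = Nat.digitChar (n % 10) := by
  by_cases h : n < 10
  · rw [toDigits_small n h, Nat.mod_eq_of_lt h]; rfl
  · rw [toDigits_step n (by omega)]; simp

lemma digitVal_digitChar (m : Nat) (h : m < 10) : pvDigitVal (Nat.digitChar m) = (m : Int) := by
  interval_cases m <;> decide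

lemma digitChar_lt (a b : Nat) (ha : a < 10) (hb : b < 10) :
    decide (Nat.digitChar a < Nat.digitChar b) = decide ((a : Int) < (b : Int)) := by
  interval_cases a <;> interval_cases b <;> decide

lemma adjAll_concat (s : List Char) (c : Char) (h : s ≠ []) :
    pvAdjAll (s ++ [c]) = (pvAdjAll s && decide (s.getLastD '0' < c)) := by
  induction s with
  | nil => exact absurd rfl h
  | cons a t ih =>
    cases t with
    | nil => simp [pvAdjAll]
    | cons b u =>
      have := ih (by simp)
      simp only [pvAdjAll, List.cons_append, List.tail_cons, List.zip_cons_cons,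
        List.all_cons] at this ⊢
      rw [this]
      simp only [Bool.and_assoc]
      rfl

lemma loop_false (l x : Int) : goodNumberLoop l false x = false := by
  rw [goodNumberLoop]; simp

lemma loop_split (l : Int) (b : Bool) (x : Int) :
    goodNumberLoop l b x = (b && goodNumberLoop l true x) := by
  cases b
  · simp [loop_false]
  · simp

-- the heart: A's peeling loop computes B's check on the digit string
lemma loop_eq_chain (n : Nat) (hn : 0 < n) : ∀ last : Int,
    goodNumberLoop last true (n : Int) =
      (decide (pvDigitVal ((Nat.toDigits 10 n).getLastD '0') < last) &&
        pvAdjAll (Nat.toDigits 10 n)) := by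
  induction n using Nat.strong_induction_on with
  | _ n ih =>
    intro last
    rw [goodNumberLoop]
    have hx : (n : Int) > 0 := by exact_mod_cast hn
    simp only [hx, and_true]
    have hmod : PySem.Int.mod (n : Int) 10 = ((n % 10 : Nat) : Int) := by
      exact_mod_cast PySem.Int.mod_natCast n 10
    have hdiv : PySem.Int.floordiv (n : Int) 10 = ((n / 10 : Nat) : Int) := by
      exact_mod_cast PySem.Int.floordiv_natCast n 10
    rw [hmod, hdiv, toDigits_getLastD,
        digitVal_digitChar (n % 10) (Nat.mod_lt n (by omega))]
    by_cases h : n < 10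
    · have hd : n / 10 = 0 := Nat.div_eq_of_lt h
      rw [hd, loop_split]
      rw [show goodNumberLoop ((n % 10 : Nat) : Int) true ((0 : Nat) : Int) = true by
        rw [goodNumberLoop]; simp]
      rw [toDigits_small n h]
      simp [pvAdjAll, Nat.mod_eq_of_lt h]
    · have hdpos : 0 < n / 10 := Nat.div_pos (by omega) (by omega)
      have hlt : n / 10 < n := Nat.div_lt_self (by omega) (by omega)
      rw [loop_split, ih (n / 10) hlt hdpos ((n % 10 : Nat) : Int),
          toDigits_step n (by omega),
          adjAll_concat _ _ (toDigits_ne_nil (n / 10)),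
          toDigits_getLastD (n / 10) '0']
      have hc := digitChar_lt (n / 10 % 10) (n % 10)
        (Nat.mod_lt _ (by omega)) (Nat.mod_lt n (by omega))
      rw [hc, digitVal_digitChar (n / 10 % 10) (Nat.mod_lt _ (by omega))]
      cases hA : decide (((n % 10 : Nat) : Int) < last) <;>
        cases hB : decide (((n / 10 % 10 : Nat) : Int) < ((n % 10 : Nat) : Int)) <;>
        cases hC : pvAdjAll (Nat.toDigits 10 (n / 10)) <;> simp_all

-- ===== VERDICT (by name: the statement is the Claim_ definition above) =====
theorem goodNumber_spec : Claim_equal_goodNumber := by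
  intro N x _
  unfold Spec_goodNumber goodNumber goodNumber_alt
  by_cases hx : x ≤ 0
  · rw [goodNumberLoop]
    simp [hx, show ¬ x > 0 by omega]
  · simp only [hx, if_false]
    have hn : 0 < x.toNat := by simp at hx; omega
    have hxe : ((x.toNat : Nat) : Int) = x := Int.toNat_of_nonneg (by omega)
    have hchars : PySem.Int.toChars x = Nat.toDigits 10 x.toNat := by
      simp [PySem.Int.toChars, show ¬ x < 0 by omega]
    rw [← hxe, loop_eq_chain x.toNat hn N]
    simp only [hchars, hxe]
    have hne := toDigits_ne_nil x.toNat
    rw [PySem.List.pyGet?_neg_one]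
    rw [PySem.List.slice_from_one]
    cases hgl : (Nat.toDigits 10 x.toNat).getLast? with
    | none => exact absurd (List.getLast?_eq_none_iff.mp hgl) hne
    | some c =>
      have : (Nat.toDigits 10 x.toNat).getLastD '0' = c := by
        rw [List.getLastD_eq_getLast?, hgl]; rfl
      rw [this]
      rfl
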